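-- pv_equiv track=rewrite | github.com/mrivassnj-svg/R3sum3OS | resumeos/analysis.py | perform_gap_analysis
-- ===== SOURCE A (Python) =====
-- from collections import Counter
-- from typing import List, Tuple
--
-- def perform_gap_analysis(resume_tokens: Counter, jd_tokens: Counter) -> Tuple[List[str], List[str]]:
--     """
--     Identifies matched keywords and missing gaps between resume and JD.
--
--     Returns:
--         Tuple containing (list of matched tokens, list of missing tokens)
--     """
--     matched = []
--     missing = []
--
--     # Iterate through tokens required by the Job Description
--     for token in jd_tokens:
--         if token in resume_tokens:
--             matched.append(token)
--         else:
--             missing.append(token)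
--
--     # Return sorted lists for consistent UI display
--     return sorted(matched), sorted(missing)
-- ===== SOURCE B (Python) =====
-- def perform_gap_analysis(resume_tokens, jd_tokens):
--     """Merge-style classification: sort the deduplicated key lists once, then
--     walk the resume keys with a single advancing pointer while scanning the JD
--     keys in order; no per-token membership test, and the outputs come out
--     sorted by construction."""
--     jd = sorted(set(jd_tokens))
--     res = sorted(set(resume_tokens))
--     matched, missing = [], []
--     i = 0
--     for t in jd:
--         while i < len(res) and res[i] < t:
--             i += 1
--         if i < len(res) and res[i] == t:
--             matched.append(t)
--         else:
--             missing.append(t)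
--     return matched, missing
-- ===== Notes on version B (the rewrite author's own statement) =====
-- stated objective: alternative
-- what changed: Instead of hash-membership partitioning followed by two sorts, B sorts the two deduplicated key lists up front and classifies JD keys by a merge-style lockstep walk with one advancing pointer over the resume keys, producing both output lists already in sorted order.
import Mathlib
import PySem

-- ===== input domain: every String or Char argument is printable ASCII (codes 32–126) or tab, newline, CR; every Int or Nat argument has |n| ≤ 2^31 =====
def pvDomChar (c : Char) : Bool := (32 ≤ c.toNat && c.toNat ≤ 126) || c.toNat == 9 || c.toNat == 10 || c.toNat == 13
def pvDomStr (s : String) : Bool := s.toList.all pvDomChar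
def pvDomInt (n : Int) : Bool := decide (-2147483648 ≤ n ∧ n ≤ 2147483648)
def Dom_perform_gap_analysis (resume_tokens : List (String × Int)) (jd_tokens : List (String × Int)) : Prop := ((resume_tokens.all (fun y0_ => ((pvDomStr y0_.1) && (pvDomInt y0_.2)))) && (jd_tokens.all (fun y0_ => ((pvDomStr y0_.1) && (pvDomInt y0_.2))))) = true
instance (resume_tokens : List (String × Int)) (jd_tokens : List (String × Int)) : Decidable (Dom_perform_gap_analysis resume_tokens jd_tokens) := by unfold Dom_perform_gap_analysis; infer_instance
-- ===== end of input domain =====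

-- B replaces A's membership-partition loop by a merge-style lockstep walk over the
-- two sorted deduplicated key lists (objective: alternative, same asymptotic cost).

-- ===== PORT A =====
-- Port of A: partition the JD dict's keys into matched/missing with an append loop, then sort both.
def perform_gap_analysis (resume_tokens : List (String × Int)) (jd_tokens : List (String × Int)) : List String × List String :=
  let resume := PySem.Dict.ofList resume_tokens
  let jd := PySem.Dict.ofList jd_tokens
  let acc := jd.keys.foldl
    (fun (acc : List String × List String) token =>
      if resume.contains token then (acc.1 ++ [token], acc.2) else (acc.1, acc.2 ++ [token]))
    ([], [])
  (PySem.List.sorted acc.1 (fun x => x) false, PySem.List.sorted acc.2 (fun x => x) false)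

-- ===== PORT B =====
-- B's inner while loop: 'while i < len(res) and res[i] < t: i += 1'
def pvAdvance (res : List String) (i : Nat) (t : String) : Nat :=
  if h : i < res.length then
    if res[i] < t then pvAdvance res (i + 1) t else i
  else i
termination_by res.length - i

-- Port of B: sort the deduplicated key lists, then classify each JD key by a
-- single advancing pointer over the sorted resume keys (merge-style lockstep walk).
def perform_gap_analysis_alt (resume_tokens : List (String × Int)) (jd_tokens : List (String × Int)) : List String × List String :=
  let jd := PySem.List.sorted (PySem.Set.ofList (jd_tokens.map Prod.fst)) (fun x => x) false
  let res := PySem.List.sorted (PySem.Set.ofList (resume_tokens.map Prod.fst)) (fun x => x) false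
  let st := jd.foldl
    (fun (st : Nat × List String × List String) t =>
      let i := pvAdvance res st.1 t
      if h : i < res.length then
        if res[i] = t then (i, st.2.1 ++ [t], st.2.2) else (i, st.2.1, st.2.2 ++ [t])
      else (i, st.2.1, st.2.2 ++ [t]))
    (0, [], [])
  (st.2.1, st.2.2)

-- ===== PRECONDITION & SPEC =====
def Spec_perform_gap_analysis (resume_tokens : List (String × Int)) (jd_tokens : List (String × Int)) (out : List String × List String) : Prop := out = perform_gap_analysis_alt resume_tokens jd_tokens
instance (resume_tokens : List (String × Int)) (jd_tokens : List (String × Int)) (out : List String × List String) : Decidable (Spec_perform_gap_analysis resume_tokens jd_tokens out) := by unfold Spec_perform_gap_analysis; infer_instance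

-- ===== CLAIM (what is proved, stated in full; the proofs are below) =====
def Claim_equal_perform_gap_analysis : Prop := ∀ (resume_tokens : List (String × Int)) (jd_tokens : List (String × Int)), Dom_perform_gap_analysis resume_tokens jd_tokens → Spec_perform_gap_analysis resume_tokens jd_tokens (perform_gap_analysis resume_tokens jd_tokens)

-- ===== LEMMAS AND PROOFS =====

-- The keys of a dict built from an association list are the first occurrences of the keys, i.e. the key set.
lemma keys_ofList_pairs (l : List (String × Int)) :
    (PySem.Dict.ofList l).keys = PySem.Set.ofList (l.map Prod.fst) := by
  show ((l.foldl (fun d p => d.insert p.1 p.2) PySem.Dict.empty).keys) = _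
  rw [PySem.Dict.keys_foldl_insert_key (key := Prod.fst) (f := fun _ p => p.2)]
  rfl

lemma pvAdvance_le (res : List String) (i : Nat) (t : String) (hi : i ≤ res.length) :
    pvAdvance res i t ≤ res.length := by
  fun_induction pvAdvance with
  | case1 i h hlt ih => exact ih (by omega)
  | case2 i h hlt => omega
  | case3 i h => omega

lemma pvAdvance_skipped (res : List String) (i : Nat) (t : String) :
    ∀ j (hj : j < res.length), i ≤ j → j < pvAdvance res i t → res[j] < t := by
  fun_induction pvAdvance with
  | case1 i h hlt ih =>
    intro j hj h1 h2
    rcases Nat.eq_or_lt_of_le h1 with rfl | h1'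
    · exact hlt
    · exact ih j hj h1' h2
  | case2 i h hlt => intro j hj h1 h2; omega
  | case3 i h => intro j hj h1 h2; omega

lemma pvAdvance_stop (res : List String) (i : Nat) (t : String)
    (h : pvAdvance res i t < res.length) : ¬ res[pvAdvance res i t] < t := by
  fun_induction pvAdvance with
  | case1 i hi hlt ih => exact ih h
  | case2 i hi hlt => exact hlt
  | case3 i hi => omega

-- The classification fold over strictly increasing JD keys with a pointer over
-- sorted resume keys computes the membership partition, appended to the accumulators.
lemma fold_classify (res : List String) (hres : res.Pairwise (· ≤ ·)) :
    ∀ (jd : List String) (i : Nat) (m s : List String), i ≤ res.length →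
      jd.Pairwise (· < ·) →
      (∀ j (hj : j < res.length), j < i → ∀ t ∈ jd, res[j] < t) →
      (jd.foldl
        (fun (st : Nat × List String × List String) t =>
          if h : pvAdvance res st.1 t < res.length then
            if res[pvAdvance res st.1 t] = t then (pvAdvance res st.1 t, st.2.1 ++ [t], st.2.2)
            else (pvAdvance res st.1 t, st.2.1, st.2.2 ++ [t])
          else (pvAdvance res st.1 t, st.2.1, st.2.2 ++ [t]))
        (i, m, s)).2 =
      (m ++ jd.filter (fun t => decide (t ∈ res)), s ++ jd.filter (fun t => decide (t ∉ res))) := by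
  intro jd
  induction jd with
  | nil => intro i m s _ _ _; simp
  | cons t jd' ih =>
    intro i m s hi hpw hinv
    have hpw' := (List.pairwise_cons.mp hpw).2
    have hthead := (List.pairwise_cons.mp hpw).1
    set i' := pvAdvance res i t with hi'
    have hle : i' ≤ res.length := pvAdvance_le res i t hi
    have hbelow : ∀ j (hj : j < res.length), j < i' → res[j] < t := by
      intro j hj hji'
      by_cases hjik : j < i
      · exact hinv j hj hjik t (by simp)
      · exact pvAdvance_skipped res i t j hj (by omega) hji'
    have hfound : (∃ h : i' < res.length, res[i'] = t) ↔ t ∈ res := by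
      constructor
      · rintro ⟨h, he⟩; exact he ▸ List.getElem_mem h
      · intro ht
        rcases List.getElem_of_mem ht with ⟨k, hk, hkt⟩
        have hki' : i' ≤ k := by
          by_contra hc
          exact absurd hkt (ne_of_lt (hbelow k hk (by omega)))
        have hlt : i' < res.length := by omega
        refine ⟨hlt, ?_⟩
        have h1 : res[i'] ≤ res[k] := by
          rcases Nat.eq_or_lt_of_le hki' with rfl | hlt'
          · exact le_refl _
          · exact List.pairwise_iff_getElem.mp hres i' k hlt hk hlt'
        have h2 := pvAdvance_stop res i t hlt
        rw [hkt] at h1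
        exact le_antisymm h1 (not_lt.mp h2)
    have hinv' : ∀ j (hj : j < res.length), j < i' → ∀ u ∈ jd', res[j] < u := by
      intro j hj hji' u hu
      exact lt_trans (hbelow j hj hji') (hthead u hu)
    by_cases hmem : t ∈ res
    · rcases hfound.mpr hmem with ⟨hlt, heq⟩
      simp only [List.foldl_cons]
      rw [dif_pos hlt, if_pos heq]
      rw [ih i' (m ++ [t]) s hle hpw' hinv']
      simp [hmem]
    · have hnf : ¬ ∃ h : i' < res.length, res[i'] = t := fun h => hmem (hfound.mp h)
      simp only [List.foldl_cons]
      have hstep : (if h : i' < res.length then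
            if res[i'] = t then (i', m ++ [t], s) else (i', m, s ++ [t])
          else (i', m, s ++ [t])) = (i', m, s ++ [t]) := by
        split_ifs with h1 h2
        · exact absurd ⟨h1, h2⟩ hnf
        · rfl
        · rfl
      rw [hstep, ih i' m (s ++ [t]) hle hpw' hinv']
      simp [hmem]

lemma contains_ofList_pairs (l : List (String × Int)) (t : String) :
    (PySem.Dict.ofList l).contains t
      = PySem.Set.contains (PySem.Set.ofList (l.map Prod.fst)) t := by
  rw [Bool.eq_iff_iff, PySem.Dict.contains_iff_mem_keys, keys_ofList_pairs,
      PySem.Set.contains_iff]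

-- sorting a filtered subset of a set equals filtering the sorted set.
lemma sorted_filter_ofList (xs : List String) (p : String → Bool) :
    PySem.List.sorted ((PySem.Set.ofList xs).filter p) (fun x => x) false
      = (PySem.List.sorted (PySem.Set.ofList xs) (fun x => x) false).filter p := by
  apply PySem.List.sorted_eq_of_perm_of_pairwise_lt
  · exact (PySem.List.sorted_perm _ _ _).filter p
  · exact (PySem.List.sorted_ofList_pairwise_lt xs).filter p

-- ===== VERDICT (by name: the statement is the Claim_ definition above) =====
theorem perform_gap_analysis_spec : Claim_equal_perform_gap_analysis := by
  intro r j _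
  show perform_gap_analysis r j = perform_gap_analysis_alt r j
  unfold perform_gap_analysis perform_gap_analysis_alt
  simp only
  rw [keys_ofList_pairs]
  set rset := PySem.Set.ofList (r.map Prod.fst) with hrset
  set jset := PySem.Set.ofList (j.map Prod.fst) with hjset
  set res := PySem.List.sorted rset (fun x => x) false with hres
  -- reduce A's partition loop to two filters
  have hfun : (fun (acc : List String × List String) token =>
      if (PySem.Dict.ofList r).contains token then (acc.1 ++ [token], acc.2)
      else (acc.1, acc.2 ++ [token]))
    = fun acc token =>
      ((fun (a : List String) t => if (PySem.Dict.ofList r).contains t then a ++ [t] else a) acc.1 token,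
       (fun (a : List String) t => if !(PySem.Dict.ofList r).contains t then a ++ [t] else a) acc.2 token) := by
    funext acc token
    cases h : (PySem.Dict.ofList r).contains token <;>
      simp only [h, Bool.not_false, Bool.not_true] <;> rfl
  rw [hfun,
      PySem.List.foldl_prod_mk
        (f := fun (a : List String) t => if (PySem.Dict.ofList r).contains t then a ++ [t] else a)
        (g := fun (a : List String) t => if !(PySem.Dict.ofList r).contains t then a ++ [t] else a),
      PySem.List.foldl_append_if_eq_filter, PySem.List.foldl_append_if_eq_filter]
  simp only [List.nil_append]
  -- reduce B's merge walk to two filters over the sorted JD keys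
  have hB := fold_classify res (PySem.List.sorted_pairwise rset (fun x => x)) (PySem.List.sorted jset (fun x => x) false) 0 [] []
        (Nat.zero_le _) (PySem.List.sorted_ofList_pairwise_lt _)
        (fun j hj hj0 => absurd hj0 (by omega))
  rw [hB]
  simp only [List.nil_append]
  -- membership in the sorted resume keys = dict containment
  have hmemb : ∀ t, (t ∈ res) ↔ (PySem.Dict.ofList r).contains t = true := by
    intro t
    rw [hres, PySem.List.mem_sorted, ← PySem.Set.contains_iff,
        Bool.eq_iff_iff.mp (contains_ofList_pairs r t)]
  rw [hjset, sorted_filter_ofList, sorted_filter_ofList, Prod.mk.injEq]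
  constructor <;> apply List.filter_congr <;> intro t _
  · simp [hmemb t]
  · simp [hmemb t]
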